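-- pv_equiv track=rewrite | github.com/brettpilch/fivethirtyeight | gerrymander.py | separate_groups
-- ===== SOURCE A (Python) =====
-- def separate_groups(groups):
--     cells = set()
--     for group in groups:
--         for cell in group:
--             if cell in cells:
--                 return False
--             cells.add(cell)
--     return True
-- ===== SOURCE B (Python) =====
-- def separate_groups(groups):
--     total = sum(len(group) for group in groups)
--     unique = len({cell for group in groups for cell in group})
--     return total == unique
-- ===== Notes on version B (the rewrite author's own statement) =====
-- stated objective: simpler
-- what changed: Replaces the incremental membership-test with early return by two aggregate counts: total number of cells vs number of distinct cells, built as one set in a single comprehension.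
import Mathlib
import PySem

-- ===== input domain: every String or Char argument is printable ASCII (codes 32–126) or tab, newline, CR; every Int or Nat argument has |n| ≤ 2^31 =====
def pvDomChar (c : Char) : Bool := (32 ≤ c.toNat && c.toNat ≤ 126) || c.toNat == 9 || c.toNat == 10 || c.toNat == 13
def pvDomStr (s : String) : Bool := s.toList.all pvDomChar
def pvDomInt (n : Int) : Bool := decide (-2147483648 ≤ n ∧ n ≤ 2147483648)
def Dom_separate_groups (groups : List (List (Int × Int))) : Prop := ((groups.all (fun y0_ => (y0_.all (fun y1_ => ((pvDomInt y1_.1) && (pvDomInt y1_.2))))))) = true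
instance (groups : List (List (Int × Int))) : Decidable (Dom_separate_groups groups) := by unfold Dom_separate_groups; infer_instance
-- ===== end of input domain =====

-- ===== PORT A =====
-- B replaces A's incremental membership check (early return) by comparing total vs distinct cell counts (objective: simpler).
-- inner loop: 'for cell in group: if cell in cells: return False; cells.add(cell)'; none = early 'return False'
def sgInner (cells : PySem.Set (Int × Int)) : List (Int × Int) → Option (PySem.Set (Int × Int))
  | [] => some cells
  | c :: rest =>
    if PySem.Set.contains cells c then none
    else sgInner (PySem.Set.add cells c) rest

-- outer loop over groups
def sgOuter (cells : PySem.Set (Int × Int)) : List (List (Int × Int)) → Bool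
  | [] => true
  | g :: gs =>
    match sgInner cells g with
    | none => false
    | some cells' => sgOuter cells' gs

def separate_groups (groups : List (List (Int × Int))) : Bool :=
  sgOuter PySem.Set.empty groups

-- ===== PORT B =====
def separate_groups_alt (groups : List (List (Int × Int))) : Bool :=
  let total := groups.foldl (fun acc g => acc + g.length) 0
  let unique := (PySem.Set.ofList (groups.flatMap (fun g => g))).length
  decide (total = unique)

-- ===== PRECONDITION & SPEC =====
def Spec_separate_groups (groups : List (List (Int × Int))) (out : Bool) : Prop := out = separate_groups_alt groups
instance (groups : List (List (Int × Int))) (out : Bool) : Decidable (Spec_separate_groups groups out) := by unfold Spec_separate_groups; infer_instance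

-- ===== CLAIM (what is proved, stated in full; the proofs are below) =====
def Claim_equal_separate_groups : Prop := ∀ (groups : List (List (Int × Int))), Dom_separate_groups groups → Spec_separate_groups groups (separate_groups groups)

-- ===== LEMMAS AND PROOFS =====

theorem sgInner_eq (cs : List (Int × Int)) : ∀ (cells : List (Int × Int)), cells.Nodup →
    sgInner cells cs = if (cells ++ cs).Nodup then some (cells ++ cs) else none := by
  induction cs with
  | nil => intro cells h; simp [sgInner, h]
  | cons c rest ih =>
    intro cells h
    by_cases hc : c ∈ cells
    · have : ¬ (cells ++ c :: rest).Nodup := by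
        intro hn
        exact (List.disjoint_of_nodup_append hn) hc List.mem_cons_self
      simp [sgInner, PySem.Set.contains, hc, this]
    · have hadd : PySem.Set.add cells c = cells ++ [c] := by
        simp [PySem.Set.add, PySem.Set.contains, hc]
      have hnd : (cells ++ [c]).Nodup := by
        rw [List.nodup_append]
        refine ⟨h, List.nodup_singleton c, ?_⟩
        intro a ha b hb
        rw [List.mem_singleton] at hb
        subst hb
        exact fun e => hc (e ▸ ha)
      rw [show sgInner cells (c :: rest) = sgInner (PySem.Set.add cells c) rest by
            simp [sgInner, PySem.Set.contains, hc],
          hadd, ih _ hnd]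
      simp [List.append_assoc]

theorem sgOuter_eq (gs : List (List (Int × Int))) : ∀ (cells : List (Int × Int)), cells.Nodup →
    sgOuter cells gs = decide ((cells ++ gs.flatMap (fun g => g)).Nodup) := by
  induction gs with
  | nil => intro cells h; simp [sgOuter, h]
  | cons g gs ih =>
    intro cells h
    rw [show sgOuter cells (g :: gs) =
          (match sgInner cells g with
           | none => false
           | some cells' => sgOuter cells' gs) from rfl,
        sgInner_eq g cells h]
    by_cases hg : (cells ++ g).Nodup
    · simp only [hg, if_pos]
      rw [ih _ hg]
      simp [List.append_assoc]
    · simp only [hg, if_neg, not_false_iff]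
      rw [List.flatMap_cons, eq_comm, decide_eq_false_iff_not, ← List.append_assoc]
      intro hn
      exact hg (hn.sublist (List.sublist_append_left (cells ++ g) _))

theorem ofList_sublist : ∀ (xs s : List (Int × Int)), List.Sublist (PySem.Set.update s xs) (s ++ xs) := by
  intro xs
  induction xs with
  | nil => intro s; simp [PySem.Set.update]
  | cons x xs ih =>
    intro s
    have h1 : PySem.Set.update s (x :: xs) = PySem.Set.update (PySem.Set.add s x) xs := rfl
    have h2 : List.Sublist (PySem.Set.add s x) (s ++ [x]) := by
      unfold PySem.Set.add
      split
      · exact List.sublist_append_left s [x]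
      · exact List.Sublist.refl _
    have h4 : List.Sublist (PySem.Set.add s x ++ xs) ((s ++ [x]) ++ xs) := h2.append_right xs
    have h5 := (h1 ▸ ih (PySem.Set.add s x)).trans h4
    simpa using h5

theorem length_ofList_eq_iff (xs : List (Int × Int)) :
    (PySem.Set.ofList xs).length = xs.length ↔ xs.Nodup := by
  constructor
  · intro h
    have hs : List.Sublist (PySem.Set.ofList xs) xs := by
      simpa using ofList_sublist xs []
    have := hs.eq_of_length h
    rw [← this]
    exact PySem.Set.nodup_ofList xs
  · intro h
    rw [PySem.Set.ofList_eq_self_of_nodup xs h]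

theorem foldl_length (gs : List (List (Int × Int))) : ∀ (acc : Nat),
    gs.foldl (fun acc g => acc + g.length) acc = acc + (gs.flatMap (fun g => g)).length := by
  induction gs with
  | nil => intro acc; simp
  | cons g gs ih => intro acc; simp [List.foldl_cons, ih, Nat.add_assoc]

-- ===== VERDICT (by name: the statement is the Claim_ definition above) =====
theorem separate_groups_spec : Claim_equal_separate_groups := by
  intro groups _
  unfold Spec_separate_groups separate_groups separate_groups_alt
  rw [sgOuter_eq groups PySem.Set.empty List.nodup_nil]
  rw [foldl_length groups 0]
  simp only [Nat.zero_add, PySem.Set.empty, List.nil_append]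
  rw [show (decide ((groups.flatMap (fun g => g)).length = (PySem.Set.ofList (groups.flatMap (fun g => g))).length)) = decide ((groups.flatMap (fun g => g)).Nodup) by
        apply decide_eq_decide.mpr
        rw [eq_comm]
        exact length_ofList_eq_iff _]
  rfl
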